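-- pv_equiv track=rewrite | github.com/lsst-sqre/sasquatch | src/sasquatch/line_protocol.py | _find_unescaped_separator
-- ===== SOURCE A (Python) =====
-- def _find_unescaped_separator(text: str, separator: str) -> int:
--     """Find the first separator character that is not escaped."""
--     escaped = False
--     for index, char in enumerate(text):
--         if escaped:
--             escaped = False
--             continue
--         if char == "\\":
--             escaped = True
--             continue
--         if char == separator:
--             return index
--     return -1
-- ===== SOURCE B (Python) =====
-- def _find_unescaped_separator(text: str, separator: str) -> int:
--     """Find the first separator character that is not escaped."""
--     if separator == "\\":
--         # an unescaped backslash always starts an escape, so it can never match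
--         return -1
--     # a character is escaped iff it is preceded by an odd-length run of backslashes
--     return next(
--         (i for i, c in enumerate(text)
--          if c == separator and (i - len(text[:i].rstrip("\\"))) % 2 == 0),
--         -1,
--     )
-- ===== Notes on version B (the rewrite author's own statement) =====
-- stated objective: alternative
-- what changed: Replaced the escaped-flag state machine by a stateless search for the first index whose character equals the separator and is preceded by an even-length run of backslashes (parity of text[:i].rstrip('\')), with no escape state carried between positions.
import Mathlib
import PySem

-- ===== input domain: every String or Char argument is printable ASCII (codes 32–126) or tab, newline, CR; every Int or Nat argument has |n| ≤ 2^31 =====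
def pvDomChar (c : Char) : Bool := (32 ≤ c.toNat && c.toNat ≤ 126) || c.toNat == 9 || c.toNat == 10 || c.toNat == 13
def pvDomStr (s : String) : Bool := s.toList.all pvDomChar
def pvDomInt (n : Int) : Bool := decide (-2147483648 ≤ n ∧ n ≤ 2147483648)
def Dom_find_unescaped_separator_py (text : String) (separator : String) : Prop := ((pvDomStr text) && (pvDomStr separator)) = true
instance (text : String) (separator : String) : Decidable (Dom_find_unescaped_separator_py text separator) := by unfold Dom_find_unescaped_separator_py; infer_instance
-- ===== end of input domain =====

-- B replaces A's escaped-flag state machine by a stateless search for the first index whose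
-- character equals the separator and is preceded by an even run of backslashes (objective: alternative).

-- ===== PORT A =====
-- A's for-loop over enumerate(text) carrying the 'escaped' flag.
def goA_find_unescaped : List Char → Bool → Nat → String → Int
  | [], _, _, _ => -1
  | c :: rest, escaped, i, sep =>
    if escaped then goA_find_unescaped rest false (i + 1) sep
    else if c == '\\' then goA_find_unescaped rest true (i + 1) sep
    else if String.ofList [c] == sep then (i : Int)
    else goA_find_unescaped rest false (i + 1) sep

def find_unescaped_separator_py (text : String) (separator : String) : Int :=
  goA_find_unescaped text.toList false 0 separator

-- ===== PORT B =====
-- text[:i].rstrip("\") ported by hand (exact for a single-char strip set): drop the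
-- trailing backslashes, i.e. reverse, dropWhile (== '\'), reverse.
def pvRstripBS (l : List Char) : List Char := (l.reverse.dropWhile (fun c => c == '\\')).reverse

-- the generator's per-index condition: c == separator and (i - len(text[:i].rstrip("\"))) % 2 == 0
-- (p.1 comes from enumerate at start 0, hence p.1 ≥ 0 and .toNat is exact for the slice text[:i])
def pvPredB (sep : String) (full : List Char) (p : Int × Char) : Bool :=
  String.ofList [p.2] == sep &&
    (PySem.Int.mod (p.1 - ((pvRstripBS (full.take p.1.toNat)).length : Int)) 2 == 0)

def find_unescaped_separator_py_alt (text : String) (separator : String) : Int :=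
  if separator == "\\" then -1
  else
    match (PySem.List.enumerate text.toList 0).find? (pvPredB separator text.toList) with
    | some p => p.1
    | none => -1

-- ===== PRECONDITION & SPEC =====
def Spec_find_unescaped_separator_py (text : String) (separator : String) (out : Int) : Prop := out = find_unescaped_separator_py_alt text separator
instance (text : String) (separator : String) (out : Int) : Decidable (Spec_find_unescaped_separator_py text separator out) := by unfold Spec_find_unescaped_separator_py; infer_instance

-- ===== CLAIM =====
def Claim_equal_find_unescaped_separator_py : Prop := ∀ (text : String) (separator : String), Dom_find_unescaped_separator_py text separator → Spec_find_unescaped_separator_py text separator (find_unescaped_separator_py text separator)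

-- ===== LEMMAS AND PROOFS =====

-- length of the trailing backslash run
def pvTB (l : List Char) : Nat := (l.reverse.takeWhile (fun c => c == '\\')).length

theorem pvRstripBS_length_add (l : List Char) : (pvRstripBS l).length + pvTB l = l.length := by
  unfold pvRstripBS pvTB
  have h1 : (l.reverse.takeWhile (fun c => c == '\\')).length
      + (l.reverse.dropWhile (fun c => c == '\\')).length = l.reverse.length := by
    rw [← List.length_append, List.takeWhile_append_dropWhile]
  simp only [List.length_reverse] at h1 ⊢
  omega

theorem pvTB_append_bs (l : List Char) : pvTB (l ++ ['\\']) = pvTB l + 1 := by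
  unfold pvTB; simp

theorem pvTB_append_other (l : List Char) (c : Char) (h : (c == '\\') = false) :
    pvTB (l ++ [c]) = 0 := by
  unfold pvTB; simp [h]

-- A with separator "\" never matches: the backslash branch fires first.
theorem goA_backslash_sep : ∀ (l : List Char) (e : Bool) (i : Nat),
    goA_find_unescaped l e i "\\" = -1 := by
  intro l
  induction l with
  | nil => intro e i; rw [goA_find_unescaped]
  | cons c rest ih =>
    intro e i
    rw [goA_find_unescaped]
    by_cases he : e = true
    · simp [he, ih]
    · simp only [Bool.not_eq_true] at he
      subst he
      by_cases hb : (c == '\\') = true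
      · simp [hb, ih]
      · have hs : (String.ofList [c] == "\\") = false := by
          apply beq_false_of_ne
          intro hcontra
          have hc : c = '\\' := by
            have := congrArg String.toList hcontra
            simpa using this
          simp [hc] at hb
        simp [hb, hs, ih]

-- the single-character string comparison with sep ≠ "\" and c = '\\' is false
theorem ofList_bs_ne (sep : String) (hsep : (sep == "\\") = false) :
    (String.ofList ['\\'] == sep) = false := by
  apply beq_false_of_ne
  intro h
  have : sep = "\\" := h.symm
  simp [this] at hsep

theorem predB_eval (sep : String) (pre rem : List Char) (c : Char) :
    pvPredB sep (pre ++ rem) ((pre.length : Int), c)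
      = (String.ofList [c] == sep && decide (pvTB pre % 2 = 0)) := by
  unfold pvPredB
  have htake : (pre ++ rem).take ((pre.length : Int)).toNat = pre := by
    simp
  rw [htake]
  congr 1
  have hlen := pvRstripBS_length_add pre
  have hsub : ((pre.length : Int) - ((pvRstripBS pre).length : Int)) = (pvTB pre : Int) := by
    omega
  rw [hsub]
  have hmod : PySem.Int.mod (pvTB pre : Int) 2 = ((pvTB pre % 2 : Nat) : Int) := by
    rw [PySem.Int.mod_eq_emod_of_pos (by norm_num : (0:Int) < 2)]
    push_cast
    omega
  rw [hmod]
  rcases Nat.mod_two_eq_zero_or_one (pvTB pre) with h | h <;> simp [h]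

-- main invariant: A from position pre.length with escaped = parity of the trailing
-- backslash run of pre equals B's find? over the enumerated suffix.
theorem goA_eq_findB (sep : String) (hsep : (sep == "\\") = false) :
    ∀ (rem pre : List Char),
      goA_find_unescaped rem (pvTB pre % 2 == 1) pre.length sep
        = (match (PySem.List.enumerate rem (pre.length : Int)).find? (pvPredB sep (pre ++ rem)) with
           | some p => p.1
           | none => -1) := by
  intro rem
  induction rem with
  | nil =>
    intro pre
    rw [goA_find_unescaped]
    simp [PySem.List.enumerate_nil]
  | cons c rest ih =>
    intro pre
    rw [goA_find_unescaped, PySem.List.enumerate_cons]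
    have hpred := predB_eval sep pre (c :: rest) c
    have hstep : ∀ (b : Bool), (pvTB (pre ++ [c]) % 2 == 1) = b →
        goA_find_unescaped rest b (pre.length + 1) sep
          = (match (PySem.List.enumerate rest ((pre.length : Int) + 1)).find?
                (pvPredB sep (pre ++ c :: rest)) with
             | some p => p.1
             | none => -1) := by
      intro b hb
      have ih' := ih (pre ++ [c])
      rw [hb] at ih'
      rw [List.append_assoc] at ih'
      simpa [List.length_append] using ih'
    by_cases hesc : pvTB pre % 2 = 1
    · -- escaped: A consumes c; B's predicate fails on parity
      have hpneg : pvPredB sep (pre ++ c :: rest) ((pre.length : Int), c) = false := by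
        rw [hpred]
        simp [hesc]
      rw [List.find?_cons_of_neg (by simp [hpneg])]
      have hflag0 : (pvTB pre % 2 == 1) = true := by simp [hesc]
      rw [hflag0]
      simp only [if_true]
      by_cases hbc : (c == '\\') = true
      · have hc : c = '\\' := by simpa using hbc
        refine hstep false ?_
        rw [hc, pvTB_append_bs]
        simp only [beq_eq_false_iff_ne, ne_eq]
        omega
      · have hbf : (c == '\\') = false := by simpa using hbc
        refine hstep false ?_
        rw [pvTB_append_other pre c hbf]
        simp
    · have hz : pvTB pre % 2 = 0 := by omega
      have hflag0 : (pvTB pre % 2 == 1) = false := by simp [hz]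
      rw [hflag0]
      simp only [Bool.false_eq_true, if_false]
      by_cases hbc : (c == '\\') = true
      · -- unescaped backslash: A sets the flag; B's predicate fails (c ≠ sep)
        have hc : c = '\\' := by simpa using hbc
        have hpneg : pvPredB sep (pre ++ c :: rest) ((pre.length : Int), c) = false := by
          rw [hpred, hc, ofList_bs_ne sep hsep]
          simp
        rw [List.find?_cons_of_neg (by simp [hpneg])]
        rw [hbc]
        simp only [if_true]
        refine hstep true ?_
        rw [hc, pvTB_append_bs]
        simp only [beq_iff_eq]
        omega
      · have hbf : (c == '\\') = false := by simpa using hbc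
        rw [hbf]
        simp only [Bool.false_eq_true, if_false]
        by_cases hs : (String.ofList [c] == sep) = true
        · -- match: both return the current index
          have hppos : pvPredB sep (pre ++ c :: rest) ((pre.length : Int), c) = true := by
            rw [hpred, hs]
            simp [hz]
          rw [List.find?_cons_of_pos (by simp [hppos])]
          rw [hs]
          simp
        · -- no match: both move on; the new prefix ends in a non-backslash, run = 0
          have hsf : (String.ofList [c] == sep) = false := by simpa using hs
          have hpneg : pvPredB sep (pre ++ c :: rest) ((pre.length : Int), c) = false := by
            rw [hpred, hsf]
            simp
          rw [List.find?_cons_of_neg (by simp [hpneg])]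
          rw [hsf]
          simp only [Bool.false_eq_true, if_false]
          refine hstep false ?_
          rw [pvTB_append_other pre c hbf]
          simp

-- ===== VERDICT =====
theorem find_unescaped_separator_py_spec : Claim_equal_find_unescaped_separator_py := by
  intro text sep _
  unfold Spec_find_unescaped_separator_py find_unescaped_separator_py find_unescaped_separator_py_alt
  by_cases hsep : (sep == "\\") = true
  · have hc : sep = "\\" := by simpa using hsep
    subst hc
    simp only [BEq.rfl, if_true]
    exact goA_backslash_sep text.toList false 0
  · have hsep' : (sep == "\\") = false := by simpa using hsep
    rw [hsep']
    simp only [Bool.false_eq_true, if_false]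
    have h := goA_eq_findB sep hsep' text.toList []
    simpa using h
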